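-- pv_equiv track=rewrite | github.com/sudheerj/datastructures-algorithms | src/python/algorithms/array/43.birthdayCakeCandles/birthday_cake_candles.py | birthday_cake_candles_single_pass
-- ===== SOURCE A (Python) =====
-- def birthday_cake_candles_single_pass(arr):
--     """
--     Single pass approach.
--     TC: O(n), SC: O(1)
--     """
--     max_height = float('-inf')
--     count = 0
--
--     for candle in arr:
--         if candle > max_height:
--             max_height = candle
--             count = 1
--         elif candle == max_height:
--             count += 1
--
--     return count
-- ===== SOURCE B (Python) =====
-- def birthday_cake_candles_single_pass(arr):
--     """Idiomatic two-pass: max() then count(), with an empty guard."""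
--     if not arr:
--         return 0
--     m = max(arr)
--     return arr.count(m)
-- ===== Notes on version B (the rewrite author's own statement) =====
-- stated objective: idiomatic
-- what changed: Replaces the fused running-max-and-count loop over an Option-like -inf sentinel by an empty guard plus two library passes: max(arr) then arr.count(max).
import Mathlib
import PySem

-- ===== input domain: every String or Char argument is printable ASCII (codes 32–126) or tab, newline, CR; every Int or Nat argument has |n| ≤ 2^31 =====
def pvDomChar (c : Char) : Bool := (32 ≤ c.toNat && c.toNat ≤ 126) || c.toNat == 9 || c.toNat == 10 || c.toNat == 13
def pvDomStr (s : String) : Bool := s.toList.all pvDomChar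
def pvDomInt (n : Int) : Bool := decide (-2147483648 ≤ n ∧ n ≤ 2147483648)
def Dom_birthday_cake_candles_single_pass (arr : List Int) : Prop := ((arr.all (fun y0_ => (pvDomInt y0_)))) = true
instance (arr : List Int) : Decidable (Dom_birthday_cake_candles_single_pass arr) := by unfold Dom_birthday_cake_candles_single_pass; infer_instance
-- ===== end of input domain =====

-- B replaces A's fused running-max-and-count loop by an empty guard plus two library passes (max, then count); return values agree on all inputs.

-- ===== PORT A =====
-- A's float('-inf') sentinel is modelled as `none` (every Int compares greater than it).
def birthday_cake_candles_single_pass (arr : List Int) : Int :=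
  (arr.foldl
    (fun (st : Option Int × Int) candle =>
      match st.1 with
      | none => (some candle, 1)
      | some mh =>
          if candle > mh then (some candle, 1)
          else if candle == mh then (st.1, st.2 + 1)
          else st)
    (none, 0)).2

-- ===== PORT B =====
def birthday_cake_candles_single_pass_alt (arr : List Int) : Int :=
  match arr with
  | [] => 0
  | x :: t =>
    match PySem.List.max? (x :: t) (fun y => y) with
    | none => 0
    | some m => (PySem.List.count (x :: t) m : Int)

-- ===== PRECONDITION & SPEC =====
def Spec_birthday_cake_candles_single_pass (arr : List Int) (out : Int) : Prop := out = birthday_cake_candles_single_pass_alt arr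
instance (arr : List Int) (out : Int) : Decidable (Spec_birthday_cake_candles_single_pass arr out) := by unfold Spec_birthday_cake_candles_single_pass; infer_instance

-- ===== CLAIM (what is proved, stated in full; the proofs are below) =====
def Claim_equal_birthday_cake_candles_single_pass : Prop := ∀ (arr : List Int), Dom_birthday_cake_candles_single_pass arr → Spec_birthday_cake_candles_single_pass arr (birthday_cake_candles_single_pass arr)

-- ===== LEMMAS AND PROOFS =====

-- Invariant of A's loop once the running max is a real element:
-- the state becomes (overall max, count of that max), where the count restarts at
-- the first element exceeding the incoming max `mh` and otherwise keeps `c`.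
theorem pv_loop_inv (l : List Int) : ∀ (mh c : Int),
    l.foldl
      (fun (st : Option Int × Int) candle =>
        match st.1 with
        | none => (some candle, 1)
        | some mh =>
            if candle > mh then (some candle, 1)
            else if candle == mh then (st.1, st.2 + 1)
            else st)
      (some mh, c)
    = (some (l.foldl max mh),
       (if l.foldl max mh > mh then 0 else c) + (l.count (l.foldl max mh) : Int)) := by
  induction l with
  | nil => intro mh c; simp
  | cons x t ih =>
    intro mh c
    simp only [List.foldl_cons]
    by_cases hx : x > mh
    · have hmax : max mh x = x := by omega
      have hMx := (PySem.List.le_foldl_max t x).1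
      have hMmh : t.foldl max x > mh := by omega
      simp only [if_pos hx, hmax, ih, if_pos hMmh, List.count_cons]
      by_cases hMeq : t.foldl max x = x
      · have hb : (x == t.foldl max x) = true := by simp; omega
        have h1 : ¬ t.foldl max x > x := by omega
        rw [if_neg h1, hb]
        simp; push_cast; omega
      · have hb : (x == t.foldl max x) = false := by simp; omega
        have h1 : t.foldl max x > x := by omega
        rw [if_pos h1, hb]
        simp
    · have hmax : max mh x = mh := by omega
      have hM := (PySem.List.le_foldl_max t mh).1
      by_cases heq : x = mh
      · have hbeq : (x == mh) = true := by simp [heq]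
        simp only [if_neg hx, hbeq, if_true, ih, hmax, List.count_cons]
        by_cases hgt : t.foldl max mh > mh
        · have hb : (x == t.foldl max mh) = false := by simp; omega
          rw [if_pos hgt, if_pos hgt, hb]
          simp
        · have hb : (x == t.foldl max mh) = true := by simp; omega
          rw [if_neg hgt, if_neg hgt, hb]
          simp; push_cast; omega
      · have hbeq : (x == mh) = false := by simp [heq]
        simp only [if_neg hx, hbeq, Bool.false_eq_true, if_false, ih, hmax, List.count_cons]
        have hb : (x == t.foldl max mh) = false := by simp; omega
        rw [hb]
        simp
-- ===== VERDICT (by name: the statement is the Claim_ definition above) =====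
theorem birthday_cake_candles_single_pass_spec : Claim_equal_birthday_cake_candles_single_pass := by
  intro arr _
  unfold Spec_birthday_cake_candles_single_pass
  cases arr with
  | nil => rfl
  | cons x t =>
    unfold birthday_cake_candles_single_pass birthday_cake_candles_single_pass_alt
    simp only [PySem.List.max?_id_cons, PySem.List.count_eq, List.foldl_cons, pv_loop_inv,
      List.count_cons]
    have hMx := (PySem.List.le_foldl_max t x).1
    by_cases hgt : t.foldl max x > x
    · have hb : (x == t.foldl max x) = false := by simp; omega
      rw [if_pos hgt, hb]
      simp
    · have hb : (x == t.foldl max x) = true := by simp; omega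
      rw [if_neg hgt, hb]
      simp; push_cast; omega
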